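-- pv_equiv track=rewrite | github.com/AhmedHossamElsayed/ENG_Dina_Task | task2_pda_balanced_parentheses.py | is_balanced_parentheses_and_anbn
-- ===== SOURCE A (Python) =====
-- def is_balanced_parentheses_and_anbn(string):
--     stack = []
--     inner_content = ""
--     # Check for balanced parentheses
--     for char in string:
--         if char == '(':
--             stack.append('(')
--         elif char == ')':
--             if not stack:
--                 return False
--             stack.pop()
--         else:
--             inner_content += char
--
--     if stack:
--         return False
--     # Check for a's b's
--     a_count = 0
--     b_count = 0
--     seen_b = False
--
--     for char in inner_content:
--         if char == 'a':
--             if seen_b: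
--                 return False
--             a_count += 1
--         elif char == 'b':
--             seen_b = True
--             b_count += 1
--         else:
--             return False
--
--     return a_count == b_count
-- ===== SOURCE B (Python) =====
-- def is_balanced_parentheses_and_anbn(string):
--     balance = 0
--     a_count = 0
--     b_count = 0
--     seen_b = False
--     for char in string:
--         if char == '(':
--             balance += 1
--         elif char == ')':
--             if balance == 0:
--                 return False
--             balance -= 1
--         elif char == 'a':
--             if seen_b:
--                 return False
--             a_count += 1
--         elif char == 'b':
--             seen_b = True
--             b_count += 1
--         else:
--             return False
--     return balance == 0 and a_count == b_count
-- ===== Notes on version B (the rewrite author's own statement) =====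
-- stated objective: faster
-- what changed: Fused A's two sequential passes (paren check with a stack building an intermediate inner_content string, then an a^n b^n scan over it) into one loop over the input that keeps an integer balance together with the a/b counters, eliminating the stack and the intermediate string entirely.
import Mathlib
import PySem

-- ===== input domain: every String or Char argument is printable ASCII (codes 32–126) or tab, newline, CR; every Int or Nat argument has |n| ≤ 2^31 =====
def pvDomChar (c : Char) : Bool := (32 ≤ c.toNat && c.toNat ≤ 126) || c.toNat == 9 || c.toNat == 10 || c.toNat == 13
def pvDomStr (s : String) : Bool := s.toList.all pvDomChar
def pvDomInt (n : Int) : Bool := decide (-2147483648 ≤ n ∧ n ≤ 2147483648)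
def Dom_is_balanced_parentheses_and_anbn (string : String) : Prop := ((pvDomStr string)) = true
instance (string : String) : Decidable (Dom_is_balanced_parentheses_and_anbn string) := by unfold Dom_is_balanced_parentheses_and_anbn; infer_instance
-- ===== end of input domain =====

-- B fuses A's two passes (stack + intermediate inner_content, then a/b scan) into one
-- loop keeping an integer balance and the a/b counters; objective: faster (no intermediate string).

-- ===== PORT A =====
-- first loop of A: stack of '(', inner_content accumulator; 'return False' = none
def pvA_loop1 : List Char → List Char → List Char → Option (List Char × List Char)
  | [], stack, inner => some (stack, inner)
  | c :: cs, stack, inner =>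
    if c = '(' then pvA_loop1 cs ('(' :: stack) inner
    else if c = ')' then
      match stack with
      | [] => none
      | _ :: rest => pvA_loop1 cs rest inner
    else pvA_loop1 cs stack (inner ++ [c])

-- second loop of A over inner_content; 'return False' = none, final 'return a_count == b_count' = some
def pvA_loop2 : List Char → Int → Int → Bool → Option Bool
  | [], a, b, _ => some (a == b)
  | c :: cs, a, b, seen =>
    if c = 'a' then (if seen then none else pvA_loop2 cs (a + 1) b seen)
    else if c = 'b' then pvA_loop2 cs a (b + 1) true
    else none

def is_balanced_parentheses_and_anbn (string : String) : Bool :=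
  match pvA_loop1 string.toList [] [] with
  | none => false
  | some (stack, inner) =>
    if stack ≠ [] then false
    else (pvA_loop2 inner 0 0 false).getD false

-- ===== PORT B =====
-- single fused loop: integer balance plus a_count/b_count/seen_b; 'return False' = false
def pvB_loop : List Char → Int → Int → Int → Bool → Bool
  | [], bal, a, b, _ => bal == 0 && a == b
  | c :: cs, bal, a, b, seen =>
    if c = '(' then pvB_loop cs (bal + 1) a b seen
    else if c = ')' then (if bal == 0 then false else pvB_loop cs (bal - 1) a b seen)
    else if c = 'a' then (if seen then false else pvB_loop cs bal (a + 1) b seen)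
    else if c = 'b' then pvB_loop cs bal a (b + 1) true
    else false

def is_balanced_parentheses_and_anbn_alt (string : String) : Bool :=
  pvB_loop string.toList 0 0 0 false

-- ===== PRECONDITION & SPEC =====
def Spec_is_balanced_parentheses_and_anbn (string : String) (out : Bool) : Prop := out = is_balanced_parentheses_and_anbn_alt string
instance (string : String) (out : Bool) : Decidable (Spec_is_balanced_parentheses_and_anbn string out) := by unfold Spec_is_balanced_parentheses_and_anbn; infer_instance

-- ===== CLAIM (what is proved, stated in full; the proofs are below) =====
def Claim_equal_is_balanced_parentheses_and_anbn : Prop := ∀ (string : String), Dom_is_balanced_parentheses_and_anbn string → Spec_is_balanced_parentheses_and_anbn string (is_balanced_parentheses_and_anbn string)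

-- ===== LEMMAS AND PROOFS =====

-- A's whole computation from a mid-loop-1 state
def pvA_run (cs stack inner : List Char) : Bool :=
  match pvA_loop1 cs stack inner with
  | none => false
  | some (st, inn) =>
    if st ≠ [] then false
    else (pvA_loop2 inn 0 0 false).getD false

-- state-transformer view of A's second loop
def pvSt2 : List Char → Int → Int → Bool → Option (Int × Int × Bool)
  | [], a, b, s => some (a, b, s)
  | c :: cs, a, b, s =>
    if c = 'a' then (if s then none else pvSt2 cs (a + 1) b s)
    else if c = 'b' then pvSt2 cs a (b + 1) true
    else none

theorem pvSt2_append (xs ys : List Char) (a b : Int) (s : Bool) :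
    pvSt2 (xs ++ ys) a b s =
      match pvSt2 xs a b s with
      | none => none
      | some (a', b', s') => pvSt2 ys a' b' s' := by
  induction xs generalizing a b s with
  | nil => simp [pvSt2]
  | cons c cs ih =>
    simp only [List.cons_append, pvSt2]
    split_ifs <;> simp [ih]

theorem pvA_loop2_eq_st2 (xs : List Char) (a b : Int) (s : Bool) :
    pvA_loop2 xs a b s = (pvSt2 xs a b s).map (fun p => p.1 == p.2.1) := by
  induction xs generalizing a b s with
  | nil => simp [pvA_loop2, pvSt2]
  | cons c cs ih =>
    simp only [pvA_loop2, pvSt2]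
    split_ifs <;> simp [ih]

theorem pvA_loop1_factor (cs : List Char) (stack inner : List Char) :
    pvA_loop1 cs stack inner =
      (pvA_loop1 cs stack []).map (fun p => (p.1, inner ++ p.2)) := by
  induction cs generalizing stack inner with
  | nil => simp [pvA_loop1]
  | cons c cs ih =>
    simp only [pvA_loop1]
    split_ifs with h1 h2
    · exact ih _ _
    · cases stack with
      | nil => simp
      | cons _ rest => exact ih _ _
    · rw [ih stack (inner ++ [c]), show ([] : List Char) ++ [c] = [c] from rfl,
        ih stack [c]]
      cases pvA_loop1 cs stack [] <;> simp

theorem pvA_run_dead (cs stack inner : List Char)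
    (h : pvSt2 inner 0 0 false = none) : pvA_run cs stack inner = false := by
  unfold pvA_run
  rw [pvA_loop1_factor]
  cases pvA_loop1 cs stack [] with
  | none => rfl
  | some p =>
    simp only [Option.map_some]
    split_ifs
    · rfl
    · simp [pvA_loop2_eq_st2, pvSt2_append, h]

theorem pvA_run_cons (c : Char) (cs stack inner : List Char) :
    pvA_run (c :: cs) stack inner =
      if c = '(' then pvA_run cs ('(' :: stack) inner
      else if c = ')' then
        (match stack with
         | [] => false
         | _ :: rest => pvA_run cs rest inner)
      else pvA_run cs stack (inner ++ [c]) := by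
  unfold pvA_run
  simp only [pvA_loop1]
  split_ifs with h1 h2
  · rfl
  · cases stack <;> rfl
  · rfl

theorem pv_main (cs : List Char) (n : ℕ) (inner : List Char) (a b : Int) (s : Bool)
    (h : pvSt2 inner 0 0 false = some (a, b, s)) :
    pvA_run cs (List.replicate n '(') inner = pvB_loop cs (n : Int) a b s := by
  induction cs generalizing n inner a b s with
  | nil =>
    unfold pvA_run pvA_loop1 pvB_loop
    cases n with
    | zero => simp [pvA_loop2_eq_st2, h]
    | succ m => simp [List.replicate_succ]; omega
  | cons c cs ih =>
    rw [pvA_run_cons]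
    simp only [pvB_loop]
    by_cases h1 : c = '('
    · rw [if_pos h1, if_pos h1, ← List.replicate_succ, ih (n + 1) inner a b s h]
      norm_num
    · rw [if_neg h1, if_neg h1]
      by_cases h2 : c = ')'
      · rw [if_pos h2, if_pos h2]
        cases n with
        | zero => simp [List.replicate]
        | succ m =>
          rw [List.replicate_succ]
          simp only []
          rw [ih m inner a b s h]
          have hne : ((((m : ℕ) + 1 : ℕ) : Int) == 0) = false := by
            simp only [beq_eq_false_iff_ne, ne_eq]
            push_cast
            omega
          rw [hne]
          push_cast
          norm_num
      · rw [if_neg h2, if_neg h2]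
        by_cases ha : c = 'a'
        · rw [if_pos ha]
          by_cases hs : s = true
          · rw [hs]
            simp only [if_true]
            exact pvA_run_dead cs (List.replicate n '(') (inner ++ [c])
              (by rw [pvSt2_append, h, hs, ha]; simp [pvSt2])
          · have hsf : s = false := by simpa using hs
            rw [hsf]
            simp only [Bool.false_eq_true, if_false]
            have h' : pvSt2 (inner ++ [c]) 0 0 false = some (a + 1, b, s) := by
              rw [pvSt2_append, h, ha, hsf]; simp [pvSt2]
            rw [ih n (inner ++ [c]) (a + 1) b s h', hsf]
        · rw [if_neg ha]
          by_cases hb : c = 'b'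
          · rw [if_pos hb]
            have h' : pvSt2 (inner ++ [c]) 0 0 false = some (a, b + 1, true) := by
              rw [pvSt2_append, h, hb]; simp [pvSt2]
            exact ih n (inner ++ [c]) a (b + 1) true h'
          · rw [if_neg hb]
            exact pvA_run_dead cs (List.replicate n '(') (inner ++ [c])
              (by rw [pvSt2_append, h]; simp [pvSt2, ha, hb])

-- ===== VERDICT (by name: the statement is the Claim_ definition above) =====
theorem is_balanced_parentheses_and_anbn_spec : Claim_equal_is_balanced_parentheses_and_anbn := by
  intro string _
  unfold Spec_is_balanced_parentheses_and_anbn is_balanced_parentheses_and_anbn is_balanced_parentheses_and_anbn_alt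
  have := pv_main string.toList 0 [] 0 0 false (by simp [pvSt2])
  simpa [pvA_run, List.replicate] using this
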